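-- pv_equiv track=rewrite | github.com/schxo99/coding-test | 프로그래머스/레벨 2/할인 행사.py | solution
-- ===== SOURCE A (Python) =====
-- def solution(want, number, discount):
--     arr, result = [], 0
--     for i in range(len(want)):
--         for k in range(number[i]):
--             arr.append(want[i])
--     arr.sort()
--     for i in range(len(discount)-9):
--         day = sorted(discount[i:i+10])
--         if arr in day or arr == day:
--             result+=1
--     return result
-- ===== SOURCE B (Python) =====
-- def solution(want, number, discount):
--     # Desired multiset as a frequency table (Counter-style dict).
--     need = {}
--     for w, n in zip(want, number):
--         if n > 0:
--             need[w] = need.get(w, 0) + n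
--     if len(discount) < 10 or sum(need.values()) != 10:
--         return 0
--     # Counter of the first 10-day window, then slide it one day at a time.
--     cnt = {}
--     for d in discount[:10]:
--         cnt[d] = cnt.get(d, 0) + 1
--     result = 1 if all(cnt.get(k, 0) == v for k, v in need.items()) else 0
--     for i in range(len(discount) - 10):
--         cnt[discount[i]] -= 1
--         entering = discount[i + 10]
--         cnt[entering] = cnt.get(entering, 0) + 1
--         if all(cnt.get(k, 0) == v for k, v in need.items()):
--             result += 1
--     return result
-- ===== Notes on version B (the rewrite author's own statement) =====
-- stated objective: faster
-- what changed: A expands want/number into a sorted multiset list (size sum(number)) and sorts every 10-day window to compare; B builds a frequency dict of the wanted items once and slides a single window counter across discount, updating it with the leaving/entering day, so no expanded list and no per-window sorting.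
import Mathlib
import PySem

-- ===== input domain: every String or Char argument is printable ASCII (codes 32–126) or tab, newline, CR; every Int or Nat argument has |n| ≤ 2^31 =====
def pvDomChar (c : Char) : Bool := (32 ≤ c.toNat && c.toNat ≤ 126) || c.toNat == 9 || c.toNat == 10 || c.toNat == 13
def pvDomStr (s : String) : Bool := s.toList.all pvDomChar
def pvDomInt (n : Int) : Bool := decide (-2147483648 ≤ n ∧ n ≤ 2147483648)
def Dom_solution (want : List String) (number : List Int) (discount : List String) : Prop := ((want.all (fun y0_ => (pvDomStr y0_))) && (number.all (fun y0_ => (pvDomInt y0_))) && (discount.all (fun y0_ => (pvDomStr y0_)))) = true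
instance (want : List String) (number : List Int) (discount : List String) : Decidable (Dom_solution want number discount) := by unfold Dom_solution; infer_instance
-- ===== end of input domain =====

-- B replaces A's expanded-multiset-and-per-window-sort by one frequency dict of the wanted items
-- and a window counter slid across discount (measurably faster; no expanded list, no window sorting).

-- ===== PORT A =====
def solution (want : List String) (number : List Int) (discount : List String) : Int :=
  -- Python's list with O(1) append is ported as Array with push (same loop, same elements)
  let arr : Array String :=
    (PySem.List.pyRange 0 (want.length : Int) 1).foldl
      (fun arr i =>
        -- want[i] / number[i]: i is always in range for want; Pre_solution guarantees it for number
        (PySem.List.pyRange 0 (PySem.List.pyGetD number i 0) 1).foldl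
          (fun arr _ => arr.push (PySem.List.pyGetD want i "")) arr) #[]
  -- arr.sort(): Python's library sort, ported as the stable mergeSort (same stable ascending order)
  let arrS := arr.toList.mergeSort (fun a b => decide (a ≤ b))
  (PySem.List.pyRange 0 ((discount.length : Int) - 9) 1).foldl
    (fun result i =>
      let day := PySem.List.sorted (PySem.List.slice discount (some i) (some (i + 10))) (fun x => x) false
      -- Python's 'arr in day or arr == day': 'arr in day' compares a list against the string
      -- elements of day, hence is always False; only 'arr == day' can make the test true
      if arrS == day then result + 1 else result) 0

-- ===== PORT B =====
def solution_alt (want : List String) (number : List Int) (discount : List String) : Int :=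
  let need : PySem.Dict String Int :=
    (want.zip number).foldl
      (fun d p => if 0 < p.2 then d.insert p.1 (d.getD p.1 0 + p.2) else d) PySem.Dict.empty
  if (discount.length : Int) < 10 ∨ need.values.sum ≠ 10 then 0
  else
    let cnt0 : PySem.Dict String Int :=
      (PySem.List.slice discount none (some 10)).foldl
        (fun d x => d.insert x (d.getD x 0 + 1)) PySem.Dict.empty
    let ok : PySem.Dict String Int → Bool := fun cnt => need.items.all (fun p => cnt.getD p.1 0 == p.2)
    let st :=
      (PySem.List.pyRange 0 ((discount.length : Int) - 10) 1).foldl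
        (fun (st : PySem.Dict String Int × Int) i =>
          let leaving := PySem.List.pyGetD discount i ""
          -- Python 'cnt[discount[i]] -= 1': the key is always present (it is in the current
          -- window), so modelling the lookup with getD _ 0 is exact
          let c1 := st.1.insert leaving (st.1.getD leaving 0 - 1)
          let entering := PySem.List.pyGetD discount (i + 10) ""
          let c2 := c1.insert entering (c1.getD entering 0 + 1)
          (c2, if ok c2 then st.2 + 1 else st.2))
        (cnt0, if ok cnt0 then 1 else 0)
    st.2

-- ===== PRECONDITION & SPEC =====
-- A indexes number[i] for every i < len(want), so it raises IndexError iff len(number) < len(want);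
-- exactly those inputs are excluded, nothing else.
def Pre_solution (want : List String) (number : List Int) (discount : List String) : Prop :=
  want.length ≤ number.length
instance (want : List String) (number : List Int) (discount : List String) : Decidable (Pre_solution want number discount) := by unfold Pre_solution; infer_instance
def pvWitness_solution : List String × List Int × List String :=
  (["aaa"], [10], ["aaa","aaa","aaa","aaa","aaa","aaa","aaa","aaa","aaa","aaa","b"])

def Spec_solution (want : List String) (number : List Int) (discount : List String) (out : Int) : Prop := out = solution_alt want number discount
instance (want : List String) (number : List Int) (discount : List String) (out : Int) : Decidable (Spec_solution want number discount out) := by unfold Spec_solution; infer_instance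

-- ===== CLAIM (what is proved, stated in full; the proofs are below) =====
def Claim_equal_solution : Prop := ∀ (want : List String) (number : List Int) (discount : List String), Dom_solution want number discount → Pre_solution want number discount → Spec_solution want number discount (solution want number discount)

-- ===== LEMMAS AND PROOFS =====

-- Python's stable library sort of strings equals PySem's sorted with identity key
lemma mergeSort_eq_pysorted (l : List String) :
    l.mergeSort (fun a b => decide (a ≤ b)) = PySem.List.sorted l (fun x => x) false := by
  symm
  apply PySem.List.sorted_id_eq_of_perm_of_pairwise
  · exact List.mergeSort_perm l _
  · have := List.pairwise_mergeSort (le := fun a b : String => decide (a ≤ b))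
      (fun a b c hab hbc => by simp at *; exact le_trans hab hbc)
      (fun a b => by simpa using le_total a b) l
    simpa using this

-- L1: lookup in B's need-dict after the zip fold
lemma needD_foldl (l : List (String × Int)) (d : PySem.Dict String Int) (w : String) :
    (l.foldl (fun d p => if 0 < p.2 then d.insert p.1 (d.getD p.1 0 + p.2) else d) d).getD w 0
      = d.getD w 0 + (l.map (fun p => if p.1 = w ∧ 0 < p.2 then p.2 else 0)).sum := by
  induction l generalizing d with
  | nil => simp
  | cons p l ih =>
    simp only [List.foldl_cons, List.map_cons, List.sum_cons]
    by_cases hp : 0 < p.2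
    · simp only [if_pos hp]
      rw [ih]
      rw [PySem.Dict.getD_insert]
      by_cases hw : w = p.1
      · simp [hw, hp]; ring
      · simp [hw]; intro h; exact absurd h.symm hw
    · simp only [if_neg hp, ih]
      have : ¬ (p.1 = w ∧ 0 < p.2) := fun h => hp h.2
      simp [this]

-- L3: counts in the expanded multiset
lemma count_flatMap_replicate (l : List (String × Int)) (w : String) :
    (((l.flatMap (fun p => List.replicate p.2.toNat p.1)).count w : Int))
      = (l.map (fun p => if p.1 = w ∧ 0 < p.2 then p.2 else 0)).sum := by
  induction l with
  | nil => simp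
  | cons p l ih =>
    simp only [List.flatMap_cons, List.count_append, List.map_cons, List.sum_cons]
    push_cast
    rw [ih, List.count_replicate]
    by_cases hw : w = p.1
    · by_cases hp : 0 < p.2
      · simp [hw, hp]; omega
      · simp [hw, hp]; omega
    · have : ¬ (p.1 = w ∧ 0 < p.2) := fun h => hw h.1.symm
      have h1 : (p.1 == w) = false := by simp; exact fun h => hw h.symm
      rw [if_neg (by simp [h1]), if_neg this]
      simp

-- pushes of a constant onto an Array accumulate at the end
lemma foldl_push_const {α β : Type} (l : List α) (c : β) (a : Array β) :
    l.foldl (fun a _ => a.push c) a = (a.toList ++ l.map (fun _ => c)).toArray := by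
  induction l generalizing a with
  | nil => simp
  | cons x l ih =>
    rw [List.foldl_cons, ih]
    simp

-- L2: A's double append loop builds the zip-expansion
lemma arrA_take (want : List String) (number : List Int) (h : want.length ≤ number.length) :
    ∀ (n : Nat), n ≤ want.length → ∀ (acc : Array String),
    (PySem.List.pyRange 0 (n : Int) 1).foldl
        (fun arr i =>
          (PySem.List.pyRange 0 (PySem.List.pyGetD number i 0) 1).foldl
            (fun arr _ => arr.push (PySem.List.pyGetD want i "")) arr) acc
      = (acc.toList ++ ((want.zip number).take n).flatMap (fun p => List.replicate p.2.toNat p.1)).toArray := by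
  intro n
  induction n with
  | zero => intro _ acc; simp [PySem.List.pyRange_one_eq_nil]
  | succ n ih =>
    intro hn acc
    have hn' : n ≤ want.length := by omega
    have hcast : ((n + 1 : Nat) : Int) = (n : Int) + 1 := by push_cast; ring
    rw [hcast, PySem.List.pyRange_one_succ_right (by positivity), List.foldl_append]
    rw [ih hn' acc]
    simp only [List.foldl_cons, List.foldl_nil]
    rw [foldl_push_const]
    simp only [List.toList_toArray]
    have hwn : n < want.length := by omega
    have hnn : n < number.length := by omega
    have hg1 : PySem.List.pyGetD want (n : Int) "" = want[n] := by
      rw [PySem.List.pyGetD_natCast]; exact List.getD_eq_getElem _ _ hwn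
    have hg2 : PySem.List.pyGetD number (n : Int) 0 = number[n] := by
      rw [PySem.List.pyGetD_natCast]; exact List.getD_eq_getElem _ _ hnn
    have hzlen : n < (want.zip number).length := by simp [List.length_zip]; omega
    have htake : (want.zip number).take (n + 1)
        = (want.zip number).take n ++ [(want[n], number[n])] := by
      rw [List.take_add_one]
      simp [List.getElem?_eq_getElem hzlen]
    rw [htake, List.flatMap_append]
    simp only [List.flatMap_cons, List.flatMap_nil, List.append_nil]
    rw [hg1, hg2]
    have hmap : (PySem.List.pyRange 0 number[n] 1).map (fun _ => want[n])
        = List.replicate (number[n]).toNat want[n] := by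
      rw [List.map_const']
      congr 1
      rw [PySem.List.length_pyRange_one]
      simp
    rw [hmap, List.append_assoc]

-- proof-side abbreviations
def pvNeed (want : List String) (number : List Int) : PySem.Dict String Int :=
  (want.zip number).foldl
    (fun d p => if 0 < p.2 then d.insert p.1 (d.getD p.1 0 + p.2) else d) PySem.Dict.empty

def pvARR (want : List String) (number : List Int) : List String :=
  (want.zip number).flatMap (fun p => List.replicate p.2.toNat p.1)

def pvW (discount : List String) (j : Nat) : List String := (discount.drop j).take 10

def pvP (want : List String) (number : List Int) (discount : List String) (j : Nat) : Bool :=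
  (pvNeed want number).items.all (fun p => ((pvW discount j).count p.1 : Int) == p.2)

lemma need_getD (want : List String) (number : List Int) (w : String) :
    (pvNeed want number).getD w 0 = ((pvARR want number).count w : Int) := by
  rw [pvNeed, needD_foldl, pvARR, count_flatMap_replicate]
  simp

lemma need_nodup_keys (want : List String) (number : List Int) :
    (pvNeed want number).keys.Nodup := by
  rw [pvNeed]
  generalize (want.zip number) = l
  have : ∀ (d : PySem.Dict String Int), d.keys.Nodup →
      (l.foldl (fun d p => if 0 < p.2 then d.insert p.1 (d.getD p.1 0 + p.2) else d) d).keys.Nodup := by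
    induction l with
    | nil => intro d hd; simpa
    | cons p l ih =>
      intro d hd
      simp only [List.foldl_cons]
      by_cases hp : 0 < p.2
      · exact ih _ (by rw [if_pos hp]; exact PySem.Dict.nodup_keys_insert _ _ _ hd)
      · exact ih _ (by rwa [if_neg hp])
  exact this _ (by simp)

-- Σ_{k ∈ K} count k l = countP (· ∈ K) l for Nodup K
lemma countP_mem_cons (l : List String) (k : String) (K : List String) (hk : k ∉ K) :
    l.countP (fun x => decide (x ∈ k :: K)) = l.count k + l.countP (fun x => decide (x ∈ K)) := by
  induction l with
  | nil => simp
  | cons a l ih =>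
    simp only [List.countP_cons, List.count_cons, ih]
    by_cases ha : a = k
    · subst ha
      simp [hk]; omega
    · by_cases haK : a ∈ K <;> simp [ha, haK] <;> omega

lemma sum_count_eq_countP (K : List String) (hK : K.Nodup) (l : List String) :
    (K.map (fun k => (l.count k : Int))).sum = (l.countP (fun x => decide (x ∈ K)) : Int) := by
  induction K with
  | nil => simp
  | cons k K ih =>
    have hk : k ∉ K := (List.nodup_cons.mp hK).1
    rw [List.map_cons, List.sum_cons, ih (List.nodup_cons.mp hK).2, countP_mem_cons l k K hk]
    push_cast; ring

lemma mem_keys_of_mem_ARR (want : List String) (number : List Int) (x : String)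
    (hx : x ∈ pvARR want number) : x ∈ (pvNeed want number).keys := by
  have hc : 0 < (pvARR want number).count x := List.count_pos_iff.mpr hx
  by_contra hmem
  have hcon : (pvNeed want number).contains x = false := by
    by_contra hcon
    exact hmem ((PySem.Dict.contains_iff_mem_keys _ _).mp (by simpa using hcon))
  have := PySem.Dict.getD_of_not_contains (d := pvNeed want number) (k := x) (d0 := (0 : Int)) hcon
  rw [need_getD] at this
  omega

lemma need_values_sum (want : List String) (number : List Int) :
    (pvNeed want number).values.sum = ((pvARR want number).length : Int) := by
  rw [PySem.Dict.values_eq_map_keys _ (need_nodup_keys want number) 0]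
  have h1 : ((pvNeed want number).keys.map (fun k => (pvNeed want number).getD k 0)).sum
      = ((pvNeed want number).keys.map (fun k => ((pvARR want number).count k : Int))).sum := by
    congr 1
    exact List.map_congr_left (fun k _ => need_getD want number k)
  rw [h1, sum_count_eq_countP _ (need_nodup_keys want number)]
  congr 1
  rw [List.countP_eq_length]
  intro a ha
  simpa using mem_keys_of_mem_ARR want number a ha

lemma W_length (discount : List String) (j : Nat) (h : j + 10 ≤ discount.length) :
    (pvW discount j).length = 10 := by
  rw [pvW, List.length_take, List.length_drop]
  omega

lemma count_W_succ (discount : List String) (j : Nat) (h : j + 10 < discount.length) (w : String) :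
    ((pvW discount (j + 1)).count w : Int)
      = ((pvW discount j).count w : Int)
        - (if discount[j]'(by omega) = w then 1 else 0)
        + (if discount[j + 10]'h = w then 1 else 0) := by
  have hj : j < discount.length := by omega
  have hd : discount.drop j = discount[j] :: discount.drop (j + 1) :=
    List.drop_eq_getElem_cons hj
  have h9 : (discount.drop (j + 1))[9]? = some (discount[j + 10]'h) := by
    rw [List.getElem?_drop]
    exact List.getElem?_eq_getElem (by omega)
  have hWj : pvW discount j = discount[j] :: (discount.drop (j + 1)).take 9 := by
    rw [pvW, hd]
    rfl
  have hWj1 : pvW discount (j + 1)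
      = (discount.drop (j + 1)).take 9 ++ [discount[j + 10]'h] := by
    rw [pvW, List.take_add_one, h9]
    rfl
  rw [hWj, hWj1, List.count_append, List.count_cons]
  simp only [List.count_cons, List.count_nil]
  by_cases h1 : discount[j] = w <;> by_cases h2 : discount[j + 10]'h = w <;>
    simp [h1, h2] <;> push_cast <;> omega

lemma count_eq_of_P (want : List String) (number : List Int) (discount : List String) (j : Nat)
    (hP : ∀ p ∈ (pvNeed want number).items, ((pvW discount j).count p.1 : Int) = p.2)
    (k : String) (hk : k ∈ (pvNeed want number).keys) :
    ((pvW discount j).count k : Int) = (pvNeed want number).getD k 0 := by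
  have : ∃ p ∈ (pvNeed want number).items, p.1 = k := by
    simpa [PySem.Dict.keys] using hk
  obtain ⟨p, hp, hpk⟩ := this
  have h1 := hP p hp
  have h2 := PySem.Dict.getD_of_mem_items (d := pvNeed want number) (k := p.1) (v := p.2)
    (by simpa using hp) (need_nodup_keys want number) 0
  rw [hpk] at h1 h2
  rw [h1.symm] at h2
  omega

lemma P_iff_perm (want : List String) (number : List Int) (discount : List String) (j : Nat)
    (h10 : (pvARR want number).length = 10) (hw : (pvW discount j).length = 10) :
    pvP want number discount j = true ↔ (pvARR want number).Perm (pvW discount j) := by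
  rw [pvP, List.all_eq_true]
  constructor
  · intro hall
    have hP : ∀ p ∈ (pvNeed want number).items, ((pvW discount j).count p.1 : Int) = p.2 := by
      intro p hp
      simpa using hall p hp
    -- every element of the window lies among need's keys
    have hsum : (((pvW discount j).countP (fun x => decide (x ∈ (pvNeed want number).keys))) : Int)
        = 10 := by
      rw [← sum_count_eq_countP _ (need_nodup_keys want number)]
      have : ((pvNeed want number).keys.map (fun k => ((pvW discount j).count k : Int))).sum
          = ((pvNeed want number).keys.map (fun k => (pvNeed want number).getD k 0)).sum := by
        congr 1
        exact List.map_congr_left (fun k hk => count_eq_of_P want number discount j hP k hk)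
      rw [this, ← PySem.Dict.values_eq_map_keys _ (need_nodup_keys want number) 0,
        need_values_sum, h10]
      norm_num
    have hmemK : ∀ a ∈ pvW discount j, a ∈ (pvNeed want number).keys := by
      have : (pvW discount j).countP (fun x => decide (x ∈ (pvNeed want number).keys))
          = (pvW discount j).length := by omega
      intro a ha
      simpa using List.countP_eq_length.mp this a ha
    rw [List.perm_iff_count]
    intro w
    by_cases hkw : w ∈ (pvNeed want number).keys
    · have h1 := count_eq_of_P want number discount j hP w hkw
      have h2 := need_getD want number w
      omega
    · have hcon : (pvNeed want number).contains w = false := by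
        by_contra hcon
        exact hkw ((PySem.Dict.contains_iff_mem_keys _ _).mp (by simpa using hcon))
      have h0 := PySem.Dict.getD_of_not_contains (d := pvNeed want number) (k := w) (0 : Int) hcon
      rw [need_getD] at h0
      have hnw : w ∉ pvW discount j := fun hmem => hkw (hmemK w hmem)
      have : (pvW discount j).count w = 0 := List.count_eq_zero.mpr hnw
      omega
  · intro hperm p hp
    have h2 := PySem.Dict.getD_of_mem_items (d := pvNeed want number) (k := p.1) (v := p.2)
      (by simpa using hp) (need_nodup_keys want number) 0
    have h3 := need_getD want number p.1
    have h4 := (List.perm_iff_count.mp hperm) p.1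
    simp only [beq_iff_eq]
    omega

def pvOk (want : List String) (number : List Int) (cnt : PySem.Dict String Int) : Bool :=
  (pvNeed want number).items.all (fun p => cnt.getD p.1 0 == p.2)

lemma ok_eq_P (want : List String) (number : List Int) (discount : List String) (j : Nat)
    (cnt : PySem.Dict String Int)
    (hc : ∀ w, cnt.getD w 0 = ((pvW discount j).count w : Int)) :
    pvOk want number cnt = pvP want number discount j := by
  rw [pvOk, pvP]
  induction (pvNeed want number).items with
  | nil => rfl
  | cons p l ih => simp only [List.all_cons, hc p.1, ih]

lemma step_inv (discount : List String) (j : Nat) (h : j + 10 < discount.length)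
    (cnt : PySem.Dict String Int)
    (hc : ∀ w, cnt.getD w 0 = ((pvW discount j).count w : Int)) (w : String) :
    (((cnt.insert (PySem.List.pyGetD discount (j : Int) "")
        (cnt.getD (PySem.List.pyGetD discount (j : Int) "") 0 - 1)).insert
          (PySem.List.pyGetD discount ((j : Int) + 10) "")
          ((cnt.insert (PySem.List.pyGetD discount (j : Int) "")
            (cnt.getD (PySem.List.pyGetD discount (j : Int) "") 0 - 1)).getD
              (PySem.List.pyGetD discount ((j : Int) + 10) "") 0 + 1)).getD w 0)
      = ((pvW discount (j + 1)).count w : Int) := by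
  have hj : j < discount.length := by omega
  have hg1 : PySem.List.pyGetD discount (j : Int) "" = discount[j] := by
    rw [PySem.List.pyGetD_natCast]; exact List.getD_eq_getElem _ _ hj
  have hcast : ((j : Int) + 10) = ((j + 10 : Nat) : Int) := by push_cast; ring
  have hg2 : PySem.List.pyGetD discount ((j : Int) + 10) "" = discount[j + 10]'h := by
    rw [hcast, PySem.List.pyGetD_natCast]; exact List.getD_eq_getElem _ _ h
  rw [hg1, hg2, count_W_succ discount j h w]
  simp only [PySem.Dict.getD_insert, hc]
  generalize discount[j]'hj = x
  generalize discount[j + 10]'h = y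
  split_ifs <;> subst_vars <;> first | omega | tauto

lemma foldB (want : List String) (number : List Int) (discount : List String) :
    ∀ (n j : Nat) (cnt : PySem.Dict String Int) (r : Int),
      j + n + 10 = discount.length →
      (∀ w, cnt.getD w 0 = ((pvW discount j).count w : Int)) →
      ((PySem.List.pyRange (j : Int) ((discount.length : Int) - 10) 1).foldl
        (fun (st : PySem.Dict String Int × Int) i =>
          ((st.1.insert (PySem.List.pyGetD discount i "") (st.1.getD (PySem.List.pyGetD discount i "") 0 - 1)).insert
              (PySem.List.pyGetD discount (i + 10) "")
              ((st.1.insert (PySem.List.pyGetD discount i "")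
                  (st.1.getD (PySem.List.pyGetD discount i "") 0 - 1)).getD
                (PySem.List.pyGetD discount (i + 10) "") 0 + 1),
            if ((List.foldl (fun d p => if 0 < p.2 then d.insert p.1 (d.getD p.1 0 + p.2) else d) PySem.Dict.empty
                    (want.zip number)).items.all
                (fun p =>
                  ((st.1.insert (PySem.List.pyGetD discount i "")
                      (st.1.getD (PySem.List.pyGetD discount i "") 0 - 1)).insert
                      (PySem.List.pyGetD discount (i + 10) "")
                      ((st.1.insert (PySem.List.pyGetD discount i "")
                          (st.1.getD (PySem.List.pyGetD discount i "") 0 - 1)).getD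
                        (PySem.List.pyGetD discount (i + 10) "") 0 + 1)).getD p.1 0 == p.2)) = true
            then st.2 + 1 else st.2)) (cnt, r)).2
      = r + ((List.range n).map
          (fun k => if pvP want number discount (j + k + 1) then (1 : Int) else 0)).sum := by
  intro n
  induction n with
  | zero =>
    intro j cnt r hlen _
    have : ((discount.length : Int) - 10) = (j : Int) := by omega
    rw [this, PySem.List.pyRange_one_eq_nil (le_refl _)]
    simp
  | succ n ih =>
    intro j cnt r hlen hc
    have hjlt : (j : Int) < (discount.length : Int) - 10 := by omega
    rw [PySem.List.pyRange_one_cons hjlt, List.foldl_cons]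
    simp only []
    have hstep : ∀ w,
        (((cnt.insert (PySem.List.pyGetD discount (j : Int) "")
            (cnt.getD (PySem.List.pyGetD discount (j : Int) "") 0 - 1)).insert
              (PySem.List.pyGetD discount ((j : Int) + 10) "")
              ((cnt.insert (PySem.List.pyGetD discount (j : Int) "")
                (cnt.getD (PySem.List.pyGetD discount (j : Int) "") 0 - 1)).getD
                  (PySem.List.pyGetD discount ((j : Int) + 10) "") 0 + 1)).getD w 0)
          = ((pvW discount (j + 1)).count w : Int) :=
      step_inv discount j (by omega) cnt hc
    have hok :
        ((List.foldl (fun d p => if 0 < p.2 then d.insert p.1 (d.getD p.1 0 + p.2) else d) PySem.Dict.empty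
            (want.zip number)).items.all
          (fun p =>
            ((cnt.insert (PySem.List.pyGetD discount (j : Int) "")
                (cnt.getD (PySem.List.pyGetD discount (j : Int) "") 0 - 1)).insert
                (PySem.List.pyGetD discount ((j : Int) + 10) "")
                ((cnt.insert (PySem.List.pyGetD discount (j : Int) "")
                    (cnt.getD (PySem.List.pyGetD discount (j : Int) "") 0 - 1)).getD
                  (PySem.List.pyGetD discount ((j : Int) + 10) "") 0 + 1)).getD p.1 0 == p.2)) =
          pvP want number discount (j + 1) :=
      ok_eq_P want number discount (j + 1) _ hstep
    have hcast : ((j : Int) + 1) = ((j + 1 : Nat) : Int) := by push_cast; ring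
    rw [hok, hcast, ih (j + 1) _ _ (by omega) hstep]
    rw [List.range_succ_eq_map, List.map_cons, List.map_map, List.sum_cons]
    have hfun : ((fun k => if pvP want number discount (j + k + 1) then (1 : Int) else 0) ∘ Nat.succ)
        = (fun k => if pvP want number discount (j + 1 + k + 1) then (1 : Int) else 0) := by
      funext k
      have : j + (k + 1) + 1 = j + 1 + k + 1 := by omega
      simp [Function.comp, Nat.succ_eq_add_one, this]
    rw [hfun]
    split_ifs <;> ring

lemma A_eq (want : List String) (number : List Int) (discount : List String)
    (hpre : want.length ≤ number.length) :
    solution want number discount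
      = ((List.range (((discount.length : Int) - 9).toNat)).countP
          (fun j => PySem.List.sorted (pvARR want number) (fun x => x) false
            == PySem.List.sorted (pvW discount j) (fun x => x) false) : Int) := by
  unfold solution
  simp only []
  rw [arrA_take want number hpre want.length (le_refl _) #[]]
  have hzip : (want.zip number).take want.length = want.zip number := by
    apply List.take_of_length_le
    rw [List.length_zip]
    omega
  rw [hzip, List.nil_append]
  simp only [List.toList_toArray]
  rw [mergeSort_eq_pysorted]
  rw [PySem.List.foldl_if_add_one
    (fun i => PySem.List.sorted ((want.zip number).flatMap (fun p => List.replicate p.2.toNat p.1)) (fun x => x) false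
      == PySem.List.sorted (PySem.List.slice discount (some i) (some (i + 10))) (fun x => x) false)]
  rw [zero_add]
  congr 1
  rw [PySem.List.pyRange_one, Int.sub_zero, List.countP_map]
  apply List.countP_congr
  intro j hj
  simp only [Function.comp, zero_add]
  have h10 : (10 : Int) = ((10 : Nat) : Int) := by norm_num
  rw [h10, PySem.List.slice_natCast_add]
  rfl

lemma main_eq (want : List String) (number : List Int) (discount : List String)
    (hpre : want.length ≤ number.length) :
    solution want number discount = solution_alt want number discount := by
  rw [A_eq want number discount hpre]
  unfold solution_alt
  simp only []
  by_cases hcond : ((discount.length : Int) < 10 ∨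
      (List.foldl (fun d p => if 0 < p.2 then d.insert p.1 (d.getD p.1 0 + p.2) else d)
        PySem.Dict.empty (want.zip number)).values.sum ≠ 10)
  · rw [if_pos hcond]
    rcases hcond with hL | hsum
    · have hm : ((discount.length : Int) - 9).toNat = 0 := by omega
      rw [hm]
      simp
    · have hs' : (pvNeed want number).values.sum ≠ 10 := hsum
      have h0 : (List.countP
          (fun j => (PySem.List.sorted (pvARR want number) fun x => x)
            == PySem.List.sorted (pvW discount j) fun x => x)
          (List.range ((discount.length : Int) - 9).toNat)) = 0 := by
        rw [List.countP_eq_zero]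
        intro j hj hpj
        have hperm : (pvARR want number).Perm (pvW discount j) :=
          (PySem.List.sorted_id_eq_sorted_id_iff_perm _ _).mp (by simpa using hpj)
        have hjm : j < ((discount.length : Int) - 9).toNat := List.mem_range.mp hj
        have hwlen : (pvW discount j).length = 10 := W_length discount j (by omega)
        have hlen := hperm.length_eq
        rw [hwlen] at hlen
        have := need_values_sum want number
        rw [hlen] at this
        exact hs' (by rw [this]; norm_num)
      rw [h0]
      norm_num
  · rw [if_neg hcond]
    push_neg at hcond
    obtain ⟨hL10, hsum⟩ := hcond
    have hsum' : (pvNeed want number).values.sum = 10 := hsum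
    have h10 : (pvARR want number).length = 10 := by
      have := need_values_sum want number
      rw [hsum'] at this
      omega
    have hcnt0 : ∀ w,
        ((PySem.List.slice discount none (some 10)).foldl
          (fun d x => d.insert x (d.getD x 0 + 1)) PySem.Dict.empty).getD w 0
          = ((pvW discount 0).count w : Int) := by
      intro w
      rw [PySem.Dict.getD_foldl_insert_add_one]
      rw [PySem.List.slice_to discount (by norm_num : (0:Int) ≤ 10)]
      simp [pvW]
    have hfold := foldB want number discount (discount.length - 10) 0
      ((PySem.List.slice discount none (some 10)).foldl
        (fun d x => d.insert x (d.getD x 0 + 1)) PySem.Dict.empty)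
      (if ((List.foldl (fun d p => if 0 < p.2 then d.insert p.1 (d.getD p.1 0 + p.2) else d)
              PySem.Dict.empty (want.zip number)).items.all
            (fun p =>
              ((PySem.List.slice discount none (some 10)).foldl
                (fun d x => d.insert x (d.getD x 0 + 1)) PySem.Dict.empty).getD p.1 0 == p.2)) = true
        then (1:Int) else 0)
      (by omega) hcnt0
    rw [Nat.cast_zero] at hfold
    refine Eq.trans ?_ hfold.symm
    have hok0 :
        ((List.foldl (fun d p => if 0 < p.2 then d.insert p.1 (d.getD p.1 0 + p.2) else d)
            PySem.Dict.empty (want.zip number)).items.all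
          (fun p =>
            ((PySem.List.slice discount none (some 10)).foldl
              (fun d x => d.insert x (d.getD x 0 + 1)) PySem.Dict.empty).getD p.1 0 == p.2)) =
          pvP want number discount 0 :=
      ok_eq_P want number discount 0 _ hcnt0
    rw [hok0]
    have hAP : ∀ j ∈ List.range (((discount.length : Int) - 9).toNat),
        ((PySem.List.sorted (pvARR want number) fun x => x)
          == PySem.List.sorted (pvW discount j) fun x => x) = pvP want number discount j := by
      intro j hj
      have hjm : j < ((discount.length : Int) - 9).toNat := List.mem_range.mp hj
      have hw : (pvW discount j).length = 10 := W_length discount j (by omega)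
      have hiff := P_iff_perm want number discount j h10 hw
      have hbeq : ((PySem.List.sorted (pvARR want number) fun x => x)
          == PySem.List.sorted (pvW discount j) fun x => x) = true
          ↔ (pvARR want number).Perm (pvW discount j) := by
        rw [beq_iff_eq, PySem.List.sorted_id_eq_sorted_id_iff_perm]
      exact Bool.eq_iff_iff.mpr (hbeq.trans hiff.symm)
    rw [List.countP_congr (q := fun j => pvP want number discount j)
      (fun j hj => by rw [hAP j hj])]
    simp only [Nat.zero_add]
    rw [PySem.List.sum_map_ite_one_zero (fun k => pvP want number discount (k + 1))]
    have hm : ((discount.length : Int) - 9).toNat = (discount.length - 10) + 1 := by omega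
    rw [hm, List.range_succ_eq_map, List.countP_cons, List.countP_map]
    have hcomp : ((fun j => pvP want number discount j) ∘ Nat.succ)
        = (fun k => pvP want number discount (k + 1)) := by
      funext k; simp [Function.comp, Nat.succ_eq_add_one]
    rw [hcomp]
    push_cast
    split_ifs <;> simp_all <;> ring

-- ===== VERDICT (by name: the statement is the Claim_ definition above) =====
theorem solution_spec : Claim_equal_solution := by
  intro want number discount _ hpre
  unfold Spec_solution
  exact main_eq want number discount hpre
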